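-- pv_equiv track=rewrite | github.com/mcgoughlin/KCD | KCD/Detection/Preprocessing/ObjectFiles/feature_extraction_utils.py | generate_mass_labels
-- ===== SOURCE A (Python) =====
-- def generate_mass_labels(entry,mass_vols,
--                          mass2kid,index,mass='cancer',upto=10):
--     mass_count=0
--     for i in range(upto):
--         if mass_count>=len(mass_vols):entry['{}_{}_vol'.format(mass,i)] = 0
--         elif mass2kid[mass_count]==index:
--             entry['{}_{}_vol'.format(mass,mass_count)] = mass_vols[mass_count]
--             mass_count+=1
--         else:entry['{}_{}_vol'.format(mass,i)] = 0
--
--     return entry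
-- ===== SOURCE B (Python) =====
-- def generate_mass_labels(entry, mass_vols, mass2kid, index, mass='cancer', upto=10):
--     n = 0
--     while n < upto and n < len(mass_vols) and mass2kid[n] == index:
--         n += 1
--     for i in range(upto):
--         entry['{}_{}_vol'.format(mass, i)] = mass_vols[i] if i < n else 0
--     return entry
-- ===== Notes on version B (the rewrite author's own statement) =====
-- stated objective: simpler
-- what changed: Replaces the stateful mass_count accumulator loop (three branches, key sometimes indexed by mass_count) by first computing the length n of the leading run of mass2kid matches and then a single uniform pass writing mass_vols[i] for i<n and 0 otherwise.
import Mathlib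
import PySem

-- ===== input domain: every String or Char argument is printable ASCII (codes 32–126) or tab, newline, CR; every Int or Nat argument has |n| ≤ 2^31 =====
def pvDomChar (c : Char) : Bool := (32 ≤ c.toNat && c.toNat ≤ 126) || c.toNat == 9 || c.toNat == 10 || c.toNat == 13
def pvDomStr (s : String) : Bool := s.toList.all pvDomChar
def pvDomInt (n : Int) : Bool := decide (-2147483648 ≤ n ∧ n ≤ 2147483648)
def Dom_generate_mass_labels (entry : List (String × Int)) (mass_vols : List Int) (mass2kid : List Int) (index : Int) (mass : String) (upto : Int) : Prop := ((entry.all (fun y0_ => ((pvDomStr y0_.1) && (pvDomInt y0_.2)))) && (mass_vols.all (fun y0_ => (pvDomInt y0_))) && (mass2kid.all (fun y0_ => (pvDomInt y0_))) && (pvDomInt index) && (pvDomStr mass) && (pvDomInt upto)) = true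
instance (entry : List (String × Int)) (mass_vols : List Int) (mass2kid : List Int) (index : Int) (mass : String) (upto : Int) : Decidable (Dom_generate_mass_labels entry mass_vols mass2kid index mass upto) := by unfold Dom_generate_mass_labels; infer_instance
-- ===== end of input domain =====

-- B replaces A's stateful mass_count loop by "compute the leading-match prefix length n, then one
-- uniform write pass" (objective: simpler). A mutates `entry` in place; B performs the same mutation,
-- and the equivalence proved here is about the returned dict value.

-- ===== PORT A =====
def gmlKey (mass : String) (i : Int) : String := mass ++ "_" ++ PySem.Int.toStr i ++ "_vol"

def generate_mass_labels (entry : List (String × Int)) (mass_vols : List Int) (mass2kid : List Int) (index : Int) (mass : String) (upto : Int) : List (String × Int) :=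
  ((PySem.List.pyRange 0 upto 1).foldl
    (fun (st : PySem.Dict String Int × Int) i =>
      if st.2 ≥ (mass_vols.length : Int) then (PySem.Dict.insert st.1 (gmlKey mass i) 0, st.2)
      else if PySem.List.pyGetD mass2kid st.2 0 = index then
        (PySem.Dict.insert st.1 (gmlKey mass st.2) (PySem.List.pyGetD mass_vols st.2 0), st.2 + 1)
      else (PySem.Dict.insert st.1 (gmlKey mass i) 0, st.2))
    (PySem.Dict.mk entry, (0 : Int))).1.items

-- ===== PORT B =====
-- the while loop of Source B: advance n while n<upto, n<len(mass_vols) and mass2kid[n]==index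
def gmlPrefix (mass_vols mass2kid : List Int) (index upto : Int) (n : Nat) : Nat :=
  if h : (n : Int) < upto ∧ n < mass_vols.length ∧ PySem.List.pyGetD mass2kid (n : Int) 0 = index then
    gmlPrefix mass_vols mass2kid index upto (n + 1)
  else n
termination_by mass_vols.length - n
decreasing_by omega

def generate_mass_labels_alt (entry : List (String × Int)) (mass_vols : List Int) (mass2kid : List Int) (index : Int) (mass : String) (upto : Int) : List (String × Int) :=
  let n := gmlPrefix mass_vols mass2kid index upto 0
  ((PySem.List.pyRange 0 upto 1).foldl
    (fun (e : PySem.Dict String Int) i =>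
      PySem.Dict.insert e (gmlKey mass i)
        (if i < (n : Int) then PySem.List.pyGetD mass_vols i 0 else 0))
    (PySem.Dict.mk entry)).items

-- ===== PRECONDITION & SPEC =====
-- Pre_ excludes exactly the inputs where A raises IndexError: the leading run of mass2kid entries
-- equal to index exhausts all of mass2kid while still shorter than both upto and mass_vols, so
-- mass2kid[mass_count] is accessed out of range (B's while loop raises at the same access).
def Pre_generate_mass_labels (entry : List (String × Int)) (mass_vols : List Int) (mass2kid : List Int) (index : Int) (mass : String) (upto : Int) : Prop :=
  ¬ ((mass2kid.takeWhile (fun v => v == index)).length = mass2kid.length ∧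
     ((mass2kid.length : Int) < upto) ∧ mass2kid.length < mass_vols.length)
instance (entry : List (String × Int)) (mass_vols : List Int) (mass2kid : List Int) (index : Int) (mass : String) (upto : Int) : Decidable (Pre_generate_mass_labels entry mass_vols mass2kid index mass upto) := by unfold Pre_generate_mass_labels; infer_instance

def pvWitness_generate_mass_labels : (List (String × Int)) × List Int × List Int × Int × String × Int :=
  ([("x", 7)], [5, 6], [1, 1, 2], 1, "cancer", 4)

def Spec_generate_mass_labels (entry : List (String × Int)) (mass_vols : List Int) (mass2kid : List Int) (index : Int) (mass : String) (upto : Int) (out : List (String × Int)) : Prop := out = generate_mass_labels_alt entry mass_vols mass2kid index mass upto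
instance (entry : List (String × Int)) (mass_vols : List Int) (mass2kid : List Int) (index : Int) (mass : String) (upto : Int) (out : List (String × Int)) : Decidable (Spec_generate_mass_labels entry mass_vols mass2kid index mass upto out) := by unfold Spec_generate_mass_labels; infer_instance

-- ===== CLAIM (what is proved, stated in full; the proofs are below) =====
def Claim_equal_generate_mass_labels : Prop := ∀ (entry : List (String × Int)) (mass_vols : List Int) (mass2kid : List Int) (index : Int) (mass : String) (upto : Int), Dom_generate_mass_labels entry mass_vols mass2kid index mass upto → Pre_generate_mass_labels entry mass_vols mass2kid index mass upto → Spec_generate_mass_labels entry mass_vols mass2kid index mass upto (generate_mass_labels entry mass_vols mass2kid index mass upto)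

-- ===== LEMMAS AND PROOFS =====

theorem gmlPrefix_spec (mv mk : List Int) (idx u : Int) (n : Nat) :
    n ≤ gmlPrefix mv mk idx u n ∧
    (∀ k : Nat, n ≤ k → k < gmlPrefix mv mk idx u n →
      (k : Int) < u ∧ k < mv.length ∧ PySem.List.pyGetD mk (k : Int) 0 = idx) ∧
    ¬ (((gmlPrefix mv mk idx u n : Int) < u) ∧ gmlPrefix mv mk idx u n < mv.length ∧
        PySem.List.pyGetD mk ((gmlPrefix mv mk idx u n : Nat) : Int) 0 = idx) := by
  suffices H : ∀ fuel n, mv.length - n ≤ fuel →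
      n ≤ gmlPrefix mv mk idx u n ∧
      (∀ k : Nat, n ≤ k → k < gmlPrefix mv mk idx u n →
        (k : Int) < u ∧ k < mv.length ∧ PySem.List.pyGetD mk (k : Int) 0 = idx) ∧
      ¬ (((gmlPrefix mv mk idx u n : Int) < u) ∧ gmlPrefix mv mk idx u n < mv.length ∧
          PySem.List.pyGetD mk ((gmlPrefix mv mk idx u n : Nat) : Int) 0 = idx) by
    exact H _ n le_rfl
  intro fuel
  induction fuel with
  | zero =>
    intro n hn
    have hc : ¬ ((n : Int) < u ∧ n < mv.length ∧ PySem.List.pyGetD mk (n : Int) 0 = idx) := by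
      intro h; omega
    rw [gmlPrefix, dif_neg hc]
    exact ⟨le_refl _, fun k hk1 hk2 => absurd hk2 (by omega), hc⟩
  | succ f ih =>
    intro n hn
    by_cases hc : ((n : Int) < u ∧ n < mv.length ∧ PySem.List.pyGetD mk (n : Int) 0 = idx)
    · rw [gmlPrefix, dif_pos hc]
      obtain ⟨ih1, ih2, ih3⟩ := ih (n + 1) (by omega)
      refine ⟨by omega, fun k hk1 hk2 => ?_, ih3⟩
      rcases Nat.eq_or_lt_of_le hk1 with rfl | hlt
      · exact hc
      · exact ih2 k hlt hk2
    · rw [gmlPrefix, dif_neg hc]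
      exact ⟨le_refl _, fun k hk1 hk2 => absurd hk2 (by omega), hc⟩

theorem main_fold (entry : List (String × Int)) (mv mk : List Int) (idx : Int) (mass : String)
    (u : Int) (k : Nat) (hk : (k : Int) ≤ u) :
    (PySem.List.pyRange 0 (k : Int) 1).foldl
      (fun (st : PySem.Dict String Int × Int) i =>
        if st.2 ≥ (mv.length : Int) then (PySem.Dict.insert st.1 (gmlKey mass i) 0, st.2)
        else if PySem.List.pyGetD mk st.2 0 = idx then
          (PySem.Dict.insert st.1 (gmlKey mass st.2) (PySem.List.pyGetD mv st.2 0), st.2 + 1)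
        else (PySem.Dict.insert st.1 (gmlKey mass i) 0, st.2))
      (PySem.Dict.mk entry, (0 : Int)) =
    ((PySem.List.pyRange 0 (k : Int) 1).foldl
      (fun (e : PySem.Dict String Int) i =>
        PySem.Dict.insert e (gmlKey mass i)
          (if i < ((gmlPrefix mv mk idx u 0 : Nat) : Int) then PySem.List.pyGetD mv i 0 else 0))
      (PySem.Dict.mk entry), ((min k (gmlPrefix mv mk idx u 0) : Nat) : Int)) := by
  induction k with
  | zero =>
    simp [PySem.List.pyRange_one_eq_nil (le_refl (0 : Int))]
  | succ k ih =>
    have hk' : (k : Int) ≤ u := by push_cast at hk ⊢; omega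
    obtain ⟨hN0, hNrun, hNstop⟩ := gmlPrefix_spec mv mk idx u 0
    set N := gmlPrefix mv mk idx u 0 with hNdef
    have hcast : ((k + 1 : Nat) : Int) = (k : Int) + 1 := by push_cast; ring
    rw [hcast, PySem.List.pyRange_one_succ_right (by positivity), List.foldl_append,
        List.foldl_append, List.foldl_cons, List.foldl_nil, List.foldl_cons, List.foldl_nil,
        ih hk']
    simp only
    by_cases hkN : k < N
    · obtain ⟨h1, h2, h3⟩ := hNrun k (Nat.zero_le _) hkN
      have hmin : min k N = k := by omega
      have hmin' : min (k + 1) N = k + 1 := by omega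
      rw [hmin, hmin', if_neg (by omega), if_pos (by exact h3),
          if_pos (by exact_mod_cast hkN)]
      rw [Prod.mk.injEq]
      exact ⟨rfl, by push_cast; ring⟩
    · have hmin : min k N = N := by omega
      have hmin' : min (k + 1) N = N := by omega
      rw [hmin, hmin', if_neg (show ¬ (k : Int) < (N : Int) by exact_mod_cast hkN)]
      by_cases hlen : mv.length ≤ N
      · rw [if_pos (by exact_mod_cast hlen)]
      · have hNlt : N < mv.length := by omega
        have hNu : (N : Int) < u := by
          have hNk : N ≤ k := by omega
          have : (N : Int) ≤ (k : Int) := by exact_mod_cast hNk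
          omega
        have hne : PySem.List.pyGetD mk ((N : Nat) : Int) 0 ≠ idx := fun h => hNstop ⟨hNu, hNlt, h⟩
        rw [if_neg (by omega), if_neg hne]

-- ===== VERDICT (by name: the statement is the Claim_ definition above) =====
theorem generate_mass_labels_spec : Claim_equal_generate_mass_labels := by
  intro entry mv mk idx mass u hdom hpre
  unfold Spec_generate_mass_labels generate_mass_labels generate_mass_labels_alt
  by_cases hu : 0 ≤ u
  · obtain ⟨k, rfl⟩ : ∃ k : Nat, (k : Int) = u := ⟨u.toNat, Int.toNat_of_nonneg hu⟩
    rw [main_fold entry mv mk idx mass _ k (le_refl _)]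
  · have hnil : PySem.List.pyRange 0 u 1 = [] := PySem.List.pyRange_one_eq_nil (by omega)
    simp [hnil]
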